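-- pv_equiv track=rewrite | github.com/bruches703/Programacion1_2025 | 5.Arrays/Desafio 1_Menu de opciones/Especificas.py | contador_iguales
-- ===== SOURCE A (Python) =====
-- def contador_iguales(array: list, opcion: int) -> int:
--     """Cuenta los positivos, los negativos o los ceros
--
--     Args:
--         array (list): array de enteros a buscar los valores positivos o negativos
--         opcion (int): opcion para contar los tipos de valores de los numeros del array
--                 0: cuenta los ceros
--                 1: cuenta los positivos
--                 2: cuenta los negativo
--     Returns:
--         int: retorna la cantidad de elementos positivos, negativos o ceros
--     """
--     contador = 0
--     if opcion == 0:
--         # cuenta los 0 en el array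
--         for elemento in array:
--             if elemento == 0:
--                 contador += 1
--     elif opcion == 1:
--         # cuenta los positivos en el array
--         for elemento in array:
--             if elemento > 0:
--                 contador += 1
--     else:
--         # cuenta los negativos en el array
--         for elemento in array:
--             if elemento < 0:
--                 contador += 1
--     return contador
-- ===== SOURCE B (Python) =====
-- def _bisect_left_zero(s):
--     # leftmost insertion point of 0 in sorted list s = number of negatives
--     lo, hi = 0, len(s)
--     while lo < hi:
--         mid = (lo + hi) // 2
--         if s[mid] < 0:
--             lo = mid + 1
--         else:
--             hi = mid
--     return lo
--
--
-- def _bisect_right_zero(s):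
--     # rightmost insertion point of 0 in sorted list s = negatives + zeros
--     lo, hi = 0, len(s)
--     while lo < hi:
--         mid = (lo + hi) // 2
--         if s[mid] <= 0:
--             lo = mid + 1
--         else:
--             hi = mid
--     return lo
--
--
-- def contador_iguales(array: list, opcion: int) -> int:
--     s = sorted(array)
--     izq = _bisect_left_zero(s)
--     der = _bisect_right_zero(s)
--     if opcion == 0:
--         return der - izq
--     elif opcion == 1:
--         return len(s) - der
--     else:
--         return izq
-- ===== Notes on version B (the rewrite author's own statement) =====
-- stated objective: alternative
-- what changed: B sorts the array and locates the zero block by two hand-written binary searches (bisect_left/bisect_right of 0), reading off negatives, zeros and positives from the two boundary indices, instead of A's branch-on-opcion followed by a linear counting loop.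
import Mathlib
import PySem

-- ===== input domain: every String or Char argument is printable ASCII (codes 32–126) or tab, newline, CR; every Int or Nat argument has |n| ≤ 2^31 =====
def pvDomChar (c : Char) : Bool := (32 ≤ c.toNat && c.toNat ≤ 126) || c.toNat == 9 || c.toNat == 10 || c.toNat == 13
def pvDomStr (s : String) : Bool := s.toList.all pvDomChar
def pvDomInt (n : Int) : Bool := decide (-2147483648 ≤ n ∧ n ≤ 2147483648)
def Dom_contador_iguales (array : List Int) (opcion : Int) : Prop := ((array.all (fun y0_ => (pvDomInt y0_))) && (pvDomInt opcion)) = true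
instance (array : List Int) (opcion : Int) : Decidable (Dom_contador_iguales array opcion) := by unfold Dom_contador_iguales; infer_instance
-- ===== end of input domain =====

-- B replaces A's branch-then-linear-count with sort + two binary searches for the zero block (alternative algorithm, not faster).

-- ===== PORT A =====
def contador_iguales (array : List Int) (opcion : Int) : Int :=
  if opcion == 0 then
    array.foldl (fun contador elemento => if elemento == 0 then contador + 1 else contador) 0
  else if opcion == 1 then
    array.foldl (fun contador elemento => if elemento > 0 then contador + 1 else contador) 0
  else
    array.foldl (fun contador elemento => if elemento < 0 then contador + 1 else contador) 0

-- ===== PORT B =====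
-- _bisect_left_zero's while loop; every call keeps 0 ≤ lo ≤ hi ≤ len s, so mid < len s
-- and `s.getD mid 0` is exactly Python's in-range `s[mid]`.
def pvBLZero (s : List Int) (lo hi : Nat) : Nat :=
  if _h : lo < hi then
    let mid := (lo + hi) / 2
    if s.getD mid 0 < 0 then pvBLZero s (mid + 1) hi else pvBLZero s lo mid
  else lo
termination_by hi - lo
decreasing_by all_goals omega

-- _bisect_right_zero's while loop; same in-range argument for `s.getD mid 0`.
def pvBRZero (s : List Int) (lo hi : Nat) : Nat :=
  if _h : lo < hi then
    let mid := (lo + hi) / 2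
    if s.getD mid 0 ≤ 0 then pvBRZero s (mid + 1) hi else pvBRZero s lo mid
  else lo
termination_by hi - lo
decreasing_by all_goals omega

def contador_iguales_alt (array : List Int) (opcion : Int) : Int :=
  let s := PySem.List.sorted array (fun x => x) false
  let izq := pvBLZero s 0 s.length
  let der := pvBRZero s 0 s.length
  if opcion == 0 then (der : Int) - (izq : Int)
  else if opcion == 1 then (s.length : Int) - (der : Int)
  else (izq : Int)

-- ===== PRECONDITION & SPEC =====
def Spec_contador_iguales (array : List Int) (opcion : Int) (out : Int) : Prop := out = contador_iguales_alt array opcion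
instance (array : List Int) (opcion : Int) (out : Int) : Decidable (Spec_contador_iguales array opcion out) := by unfold Spec_contador_iguales; infer_instance

-- ===== CLAIM =====
def Claim_equal_contador_iguales : Prop := ∀ (array : List Int) (opcion : Int), Dom_contador_iguales array opcion → Spec_contador_iguales array opcion (contador_iguales array opcion)

-- ===== LEMMAS AND PROOFS =====

-- A's three counting loops compute countP of their predicates.
theorem pv_foldA_zero (l : List Int) (k : Int) :
    l.foldl (fun contador elemento => if elemento == 0 then contador + 1 else contador) k
      = k + (l.countP (fun e => e == 0) : Int) := by
  induction l generalizing k with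
  | nil => simp
  | cons a t ih =>
      simp only [List.foldl, List.countP_cons, ih]
      by_cases hp : a = 0
      · simp [hp]; ring
      · simp [hp]

theorem pv_foldA_pos (l : List Int) (k : Int) :
    l.foldl (fun contador elemento => if elemento > 0 then contador + 1 else contador) k
      = k + (l.countP (fun e => decide (e > 0)) : Int) := by
  induction l generalizing k with
  | nil => simp
  | cons a t ih =>
      simp only [List.foldl, List.countP_cons, ih]
      by_cases hp : a > 0
      · simp [hp]; ring
      · simp [hp]

theorem pv_foldA_neg (l : List Int) (k : Int) :
    l.foldl (fun contador elemento => if elemento < 0 then contador + 1 else contador) k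
      = k + (l.countP (fun e => decide (e < 0)) : Int) := by
  induction l generalizing k with
  | nil => simp
  | cons a t ih =>
      simp only [List.foldl, List.countP_cons, ih]
      by_cases hp : a < 0
      · simp [hp]; ring
      · simp [hp]

-- A cut index determines countP.
theorem pv_countP_cut (p : Int → Bool) (s : List Int) (r : Nat) (hr : r ≤ s.length)
    (h1 : ∀ (j : Nat) (hj : j < s.length), j < r → p s[j])
    (h2 : ∀ (j : Nat) (hj : j < s.length), r ≤ j → ¬ p s[j] = true) :
    s.countP p = r := by
  conv_lhs => rw [← List.take_append_drop r s]
  rw [List.countP_append]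
  have htake : (s.take r).countP p = r := by
    have hall : ∀ a ∈ s.take r, p a := by
      intro a ha
      obtain ⟨i, hi, hia⟩ := List.mem_iff_getElem.1 ha
      have hi' : i < r ∧ i < s.length := by simpa using hi
      rw [List.getElem_take] at hia
      subst hia
      exact h1 i hi'.2 hi'.1
    rw [List.countP_eq_length.2 hall, List.length_take]
    omega
  have hdrop : (s.drop r).countP p = 0 := by
    rw [List.countP_eq_zero]
    intro a ha
    obtain ⟨i, hi, hia⟩ := List.mem_iff_getElem.1 ha
    have hil : r + i < s.length := by simp at hi; omega
    rw [List.getElem_drop] at hia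
    subst hia
    exact h2 (r + i) hil (Nat.le_add_right r i)
  omega

-- The bisect-left loop lands on countP (· < 0) of a sorted list.
theorem pv_blZero_eq (s : List Int) (hs : s.Pairwise (· ≤ ·)) :
    ∀ (n lo hi : Nat), hi - lo ≤ n → lo ≤ hi → hi ≤ s.length →
    (∀ (j : Nat) (hj : j < s.length), j < lo → s[j] < 0) →
    (∀ (j : Nat) (hj : j < s.length), hi ≤ j → ¬ s[j] < 0) →
    pvBLZero s lo hi = s.countP (fun e => decide (e < 0)) := by
  intro n
  induction n with
  | zero =>
      intro lo hi hn hlh hhl h1 h2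
      have : ¬ lo < hi := by omega
      rw [pvBLZero, dif_neg this]
      exact (pv_countP_cut _ s lo (le_trans hlh hhl)
        (fun j hj hjlo => by simpa using h1 j hj hjlo)
        (fun j hj hloj => by simpa using h2 j hj (by omega))).symm
  | succ n ih =>
      intro lo hi hn hlh hhl h1 h2
      by_cases h : lo < hi
      · rw [pvBLZero, dif_pos h]
        have hmid : (lo + hi) / 2 < s.length := by omega
        have hg : s.getD ((lo + hi) / 2) 0 = s[(lo + hi) / 2] := List.getD_eq_getElem s 0 hmid
        have hmono := List.pairwise_iff_getElem.1 hs
        by_cases hc : s.getD ((lo + hi) / 2) 0 < 0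
        · rw [if_pos hc]
          refine ih ((lo + hi) / 2 + 1) hi (by omega) (by omega) hhl ?_ h2
          intro j hj hjm
          have hj2 : j ≤ (lo + hi) / 2 := by omega
          rcases eq_or_lt_of_le hj2 with rfl | hlt
          · exact hg ▸ hc
          · have := hmono j ((lo + hi) / 2) hj hmid hlt
            omega
        · rw [if_neg hc]
          refine ih lo ((lo + hi) / 2) (by omega) (by omega) (by omega) h1 ?_
          intro j hj hmj
          rcases eq_or_lt_of_le hmj with rfl | hlt
          · exact hg ▸ hc
          · have := hmono ((lo + hi) / 2) j hmid hj hlt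
            omega
      · rw [pvBLZero, dif_neg h]
        exact (pv_countP_cut _ s lo (le_trans hlh hhl)
          (fun j hj hjlo => by simpa using h1 j hj hjlo)
          (fun j hj hloj => by simpa using h2 j hj (by omega))).symm

-- The bisect-right loop lands on countP (· ≤ 0) of a sorted list.
theorem pv_brZero_eq (s : List Int) (hs : s.Pairwise (· ≤ ·)) :
    ∀ (n lo hi : Nat), hi - lo ≤ n → lo ≤ hi → hi ≤ s.length →
    (∀ (j : Nat) (hj : j < s.length), j < lo → s[j] ≤ 0) →
    (∀ (j : Nat) (hj : j < s.length), hi ≤ j → ¬ s[j] ≤ 0) →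
    pvBRZero s lo hi = s.countP (fun e => decide (e ≤ 0)) := by
  intro n
  induction n with
  | zero =>
      intro lo hi hn hlh hhl h1 h2
      have : ¬ lo < hi := by omega
      rw [pvBRZero, dif_neg this]
      exact (pv_countP_cut _ s lo (le_trans hlh hhl)
        (fun j hj hjlo => by simpa using h1 j hj hjlo)
        (fun j hj hloj => by simpa using h2 j hj (by omega))).symm
  | succ n ih =>
      intro lo hi hn hlh hhl h1 h2
      by_cases h : lo < hi
      · rw [pvBRZero, dif_pos h]
        have hmid : (lo + hi) / 2 < s.length := by omega
        have hg : s.getD ((lo + hi) / 2) 0 = s[(lo + hi) / 2] := List.getD_eq_getElem s 0 hmid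
        have hmono := List.pairwise_iff_getElem.1 hs
        by_cases hc : s.getD ((lo + hi) / 2) 0 ≤ 0
        · rw [if_pos hc]
          refine ih ((lo + hi) / 2 + 1) hi (by omega) (by omega) hhl ?_ h2
          intro j hj hjm
          have hj2 : j ≤ (lo + hi) / 2 := by omega
          rcases eq_or_lt_of_le hj2 with rfl | hlt
          · exact hg ▸ hc
          · have := hmono j ((lo + hi) / 2) hj hmid hlt
            omega
        · rw [if_neg hc]
          refine ih lo ((lo + hi) / 2) (by omega) (by omega) (by omega) h1 ?_
          intro j hj hmj
          rcases eq_or_lt_of_le hmj with rfl | hlt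
          · exact hg ▸ hc
          · have := hmono ((lo + hi) / 2) j hmid hj hlt
            omega
      · rw [pvBRZero, dif_neg h]
        exact (pv_countP_cut _ s lo (le_trans hlh hhl)
          (fun j hj hjlo => by simpa using h1 j hj hjlo)
          (fun j hj hloj => by simpa using h2 j hj (by omega))).symm

theorem pv_countP_le_split (l : List Int) :
    l.countP (fun e => decide (e ≤ 0)) =
      l.countP (fun e => decide (e < 0)) + l.countP (fun e => e == 0) := by
  induction l with
  | nil => simp
  | cons a t ih =>
      simp only [List.countP_cons, ih]
      rcases lt_trichotomy a 0 with h | rfl | h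
      · simp [Int.ne_of_lt h, h, le_of_lt h]; omega
      · simp; omega
      · simp [Int.ne_of_gt h, not_le_of_gt h, not_lt_of_gt h]

theorem pv_countP_len_split (l : List Int) :
    l.length = l.countP (fun e => decide (e ≤ 0)) + l.countP (fun e => decide (e > 0)) := by
  induction l with
  | nil => simp
  | cons a t ih =>
      simp only [List.countP_cons, List.length_cons, ih]
      by_cases h : a ≤ 0
      · simp [h, not_lt_of_ge h]; omega
      · simp [h, lt_of_not_ge h]; omega

-- ===== VERDICT =====
theorem contador_iguales_spec : Claim_equal_contador_iguales := by
  intro array opcion _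
  unfold Spec_contador_iguales contador_iguales contador_iguales_alt
  set s := PySem.List.sorted array (fun x => x) false with hsdef
  have hpair : s.Pairwise (· ≤ ·) := PySem.List.sorted_pairwise array (fun x => x)
  have hperm : s.Perm array := PySem.List.sorted_perm array (fun x => x) false
  have hbl : pvBLZero s 0 s.length = s.countP (fun e => decide (e < 0)) :=
    pv_blZero_eq s hpair s.length 0 s.length (by omega) (by omega) (le_refl _)
      (by intro j hj h; omega) (by intro j hj h; omega)
  have hbr : pvBRZero s 0 s.length = s.countP (fun e => decide (e ≤ 0)) :=
    pv_brZero_eq s hpair s.length 0 s.length (by omega) (by omega) (le_refl _)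
      (by intro j hj h; omega) (by intro j hj h; omega)
  have hzero : array.countP (fun e => e == 0) = s.countP (fun e => e == 0) :=
    (hperm.countP_eq _).symm
  have hpos : array.countP (fun e => decide (e > 0)) = s.countP (fun e => decide (e > 0)) :=
    (hperm.countP_eq _).symm
  have hneg : array.countP (fun e => decide (e < 0)) = s.countP (fun e => decide (e < 0)) :=
    (hperm.countP_eq _).symm
  have hsplit := pv_countP_le_split s
  have hlensplit := pv_countP_len_split s
  have hlen : s.length = array.length := hperm.length_eq
  by_cases h0 : opcion = 0
  · have e0 : (opcion == 0) = true := by simp [h0]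
    simp only [e0, if_true, pv_foldA_zero, zero_add, hbl, hbr, hzero]
    omega
  · have e0 : (opcion == 0) = false := by simp [h0]
    by_cases h1 : opcion = 1
    · have e1 : (opcion == 1) = true := by simp [h1]
      simp only [e0, e1, Bool.false_eq_true, if_false, if_true, pv_foldA_pos, zero_add, hbr, hpos]
      omega
    · have e1 : (opcion == 1) = false := by simp [h1]
      simp only [e0, e1, Bool.false_eq_true, if_false, pv_foldA_neg, zero_add, hbl, hneg]
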